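-- pv_equiv track=rewrite | github.com/jasonxyliu/ltl_transfer | src/ltl_progression.py | _get_truth_assignments
-- ===== SOURCE A (Python) =====
-- def _get_truth_assignments(propositions):
--     """
--     computing all possible Truth value assignments for propositions,
--     represented by a list of true propositions
--     e.g. ['a', 'b', 'c'] -> ['', 'a', 'b', 'ab', 'c', 'ac', 'bc', 'abc']
--     """
--     truth_assignments = []
--     for p in range(2**len(propositions)):
--         truth_assignment = ""
--         p_id = 0
--         while p > 0:
--             if p % 2 == 1:
--                 truth_assignment += propositions[p_id]
--             p //= 2
--             p_id += 1
--         truth_assignments.append(truth_assignment)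
--     return truth_assignments
-- ===== SOURCE B (Python) =====
-- def _get_truth_assignments(propositions):
--     """All truth assignments as concatenated true-proposition strings, by iterative doubling."""
--     truth_assignments = [""]
--     for p in propositions:
--         truth_assignments = truth_assignments + [s + p for s in truth_assignments]
--     return truth_assignments
-- ===== Notes on version B (the rewrite author's own statement) =====
-- stated objective: idiomatic
-- what changed: Replaces the loop over all 2^n integers with per-integer bit decoding by iterative doubling: start from the singleton list holding the empty string and, for each proposition, append the suffixed copies of the current list.
import Mathlib
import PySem

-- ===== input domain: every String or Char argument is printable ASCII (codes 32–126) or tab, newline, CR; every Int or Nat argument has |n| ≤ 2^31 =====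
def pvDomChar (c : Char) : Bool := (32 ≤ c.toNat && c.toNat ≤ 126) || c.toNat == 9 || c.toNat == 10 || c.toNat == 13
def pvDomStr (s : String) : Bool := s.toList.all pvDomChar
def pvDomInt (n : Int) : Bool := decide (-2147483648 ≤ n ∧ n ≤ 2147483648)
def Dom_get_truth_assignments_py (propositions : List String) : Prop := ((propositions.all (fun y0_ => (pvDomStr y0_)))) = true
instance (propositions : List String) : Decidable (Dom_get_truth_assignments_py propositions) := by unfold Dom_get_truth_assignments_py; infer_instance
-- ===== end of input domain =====

-- B builds the subset strings by iterative doubling over the propositions instead of bit-decoding every integer in range(2^n); objective: idiomatic.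


-- ===== PORT A =====
-- Inner while loop of A: p decoded bit by bit, p_id walks the index.
-- propositions[p_id] is ported with pyGet?; inside A's loop p < 2^len(propositions),
-- so the index is always in range and the .getD "" default is never taken.
def pvDecodeA (propositions : List String) : Nat → Int → String
  | 0, _ => ""
  | Nat.succ m, i =>
      (if (m + 1) % 2 = 1 then ((PySem.List.pyGet? propositions i).getD "") else "")
        ++ pvDecodeA propositions ((m + 1) / 2) (i + 1)
  termination_by p _ => p
  decreasing_by exact Nat.div_lt_self (Nat.succ_pos m) (by omega)

def get_truth_assignments_py (propositions : List String) : List String :=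
  (List.range (2 ^ propositions.length)).foldl
    (fun acc p => acc ++ [pvDecodeA propositions p 0]) []

-- ===== PORT B =====
def get_truth_assignments_py_alt (propositions : List String) : List String :=
  propositions.foldl (fun res p => res ++ res.map (fun s => s ++ p)) [""]

-- ===== PRECONDITION & SPEC =====
def Spec_get_truth_assignments_py (propositions : List String) (out : List String) : Prop := out = get_truth_assignments_py_alt propositions
instance (propositions : List String) (out : List String) : Decidable (Spec_get_truth_assignments_py propositions out) := by unfold Spec_get_truth_assignments_py; infer_instance

-- ===== CLAIM (what is proved, stated in full; the proofs are below) =====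
def Claim_equal_get_truth_assignments_py : Prop := ∀ (propositions : List String), Dom_get_truth_assignments_py propositions → Spec_get_truth_assignments_py propositions (get_truth_assignments_py propositions)

-- ===== LEMMAS AND PROOFS =====

-- Clean specification of the bit-decoded subset string: low bit selects the head.
def pvEnc : List String → Nat → String
  | [], _ => ""
  | q :: ps, p => (if p % 2 = 1 then q else "") ++ pvEnc ps (p / 2)

theorem pvDecodeA_nil (p : Nat) (i : Int) : pvDecodeA [] p i = "" := by
  induction p using Nat.strong_induction_on generalizing i with
  | _ p ih =>
    cases p with
    | zero => simp [pvDecodeA]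
    | succ m =>
      rw [pvDecodeA]
      rw [ih ((m + 1) / 2) (Nat.div_lt_self (Nat.succ_pos m) (by omega)) (i + 1)]
      split <;> simp [PySem.List.pyGet?, PySem.List.pyIdx?]

theorem pvDecodeA_shift (p : Nat) : ∀ (q : String) (ps : List String) (i : Int), 0 ≤ i →
    pvDecodeA (q :: ps) p (i + 1) = pvDecodeA ps p i := by
  induction p using Nat.strong_induction_on with
  | _ p ih =>
    intro q ps i hi
    cases p with
    | zero => simp [pvDecodeA]
    | succ m =>
      rw [pvDecodeA, pvDecodeA]
      rw [ih ((m + 1) / 2) (Nat.div_lt_self (Nat.succ_pos m) (by omega)) q ps (i + 1) (by omega)]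
      congr 1
      split
      · congr 1
        rw [PySem.List.pyGet?_of_nonneg _ (by omega : (0:Int) ≤ i + 1),
            PySem.List.pyGet?_of_nonneg _ hi]
        have h : (i + 1).toNat = i.toNat + 1 := by omega
        rw [h, List.getElem?_cons_succ]
      · rfl

theorem pvEnc_zero (ps : List String) : pvEnc ps 0 = "" := by
  induction ps with
  | nil => rfl
  | cons q ps ih => simp [pvEnc, ih]

theorem pvDecodeA_eq_enc (ps : List String) : ∀ p, pvDecodeA ps p 0 = pvEnc ps p := by
  induction ps with
  | nil => intro p; rw [pvDecodeA_nil]; rfl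
  | cons q ps ih =>
    intro p
    cases p with
    | zero => simp [pvDecodeA, pvEnc, pvEnc_zero]
    | succ m =>
      rw [pvDecodeA, pvEnc]
      rw [pvDecodeA_shift ((m + 1) / 2) q ps 0 (by omega), ih ((m + 1) / 2)]
      congr 1
      split <;> simp [PySem.List.pyGet?, PySem.List.pyIdx?]

-- bits below |ps| ignore multiples of 2^|ps|
theorem pvEnc_add_pow (ps : List String) : ∀ p m,
    pvEnc ps (p + 2 ^ ps.length * m) = pvEnc ps p := by
  induction ps with
  | nil => intro p m; rfl
  | cons q ps ih =>
    intro p m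
    simp only [pvEnc, List.length_cons]
    have hmod : (p + 2 ^ (ps.length + 1) * m) % 2 = p % 2 := by
      have : 2 ^ (ps.length + 1) * m = 2 * (2 ^ ps.length * m) := by ring
      omega
    have hdiv : (p + 2 ^ (ps.length + 1) * m) / 2 = p / 2 + 2 ^ ps.length * m := by
      have : 2 ^ (ps.length + 1) * m = 2 * (2 ^ ps.length * m) := by ring
      omega
    simp only [hmod, hdiv, ih]

theorem pvEnc_append (ps : List String) : ∀ (q : String) p,
    pvEnc (ps ++ [q]) p = pvEnc ps p ++ (if (p / 2 ^ ps.length) % 2 = 1 then q else "") := by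
  induction ps with
  | nil =>
    intro q p
    simp [pvEnc]
  | cons r ps ih =>
    intro q p
    simp only [List.cons_append, pvEnc, List.length_cons]
    rw [ih q (p / 2), String.append_assoc]
    have h : p / 2 / 2 ^ ps.length = p / 2 ^ (ps.length + 1) := by
      rw [Nat.div_div_eq_div_mul]
      congr 1
      ring
    have h' : (if p / 2 / 2 ^ ps.length % 2 = 1 then q else "")
        = (if p / 2 ^ (ps.length + 1) % 2 = 1 then q else "") := by
      split_ifs with h1 h2 <;> first | rfl | (exfalso; omega)
    rw [h']
    rfl

def pvAmap (ps : List String) : List String :=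
  (List.range (2 ^ ps.length)).map (pvEnc ps)

theorem pvAmap_snoc (ps : List String) (q : String) :
    pvAmap (ps ++ [q]) = pvAmap ps ++ (pvAmap ps).map (fun s => s ++ q) := by
  unfold pvAmap
  have hlen : (ps ++ [q]).length = ps.length + 1 := by simp
  rw [hlen]
  have hpow : 2 ^ (ps.length + 1) = 2 ^ ps.length + 2 ^ ps.length := by ring
  rw [hpow, List.range_add, List.map_append, List.map_map]
  congr 1
  · apply List.map_congr_left
    intro p hp
    have hp' : p < 2 ^ ps.length := List.mem_range.mp hp
    rw [pvEnc_append]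
    rw [Nat.div_eq_of_lt hp']
    simp
  · rw [List.map_map]
    apply List.map_congr_left
    intro p hp
    have hp' : p < 2 ^ ps.length := List.mem_range.mp hp
    simp only [Function.comp]
    rw [pvEnc_append]
    have h1 : 2 ^ ps.length + p = p + 2 ^ ps.length * 1 := by ring
    rw [h1, pvEnc_add_pow]
    have h2 : (p + 2 ^ ps.length * 1) / 2 ^ ps.length = 1 := by
      rw [Nat.add_mul_div_left _ _ (Nat.pow_pos (by omega))]
      rw [Nat.div_eq_of_lt hp']
    rw [h2]
    simp

theorem pv_foldl_append_map {α β : Type} (f : α → β) (l : List α) :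
    ∀ acc : List β, l.foldl (fun acc p => acc ++ [f p]) acc = acc ++ l.map f := by
  induction l with
  | nil => intro acc; simp
  | cons x l ih => intro acc; simp [List.foldl, ih]

theorem pvA_eq_Amap (ps : List String) : get_truth_assignments_py ps = pvAmap ps := by
  unfold get_truth_assignments_py pvAmap
  rw [pv_foldl_append_map]
  simp only [List.nil_append]
  apply List.map_congr_left
  intro p _
  exact pvDecodeA_eq_enc ps p

theorem pvB_eq_Amap (ps : List String) : get_truth_assignments_py_alt ps = pvAmap ps := by
  unfold get_truth_assignments_py_alt
  induction ps using List.reverseRecOn with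
  | nil => rfl
  | append_singleton ps q ih =>
    rw [List.foldl_append, List.foldl_cons, List.foldl_nil, ih, pvAmap_snoc]

-- ===== VERDICT (by name: the statement is the Claim_ definition above) =====
theorem get_truth_assignments_py_spec : Claim_equal_get_truth_assignments_py := by
  intro ps _
  unfold Spec_get_truth_assignments_py
  rw [pvA_eq_Amap, pvB_eq_Amap]
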